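-- pv_equiv track=rewrite | github.com/M-Eng/jlogs | jlog/templates.py | get_aggregated_table_template
-- ===== SOURCE A (Python) =====
-- def get_aggregated_table_template(title: str, entries: list) -> str:
--     """
--     Get the aggregated table template with entries.
--
--     Args:
--         title: The section title (e.g., "What I accomplished")
--         entries: List of (date, entry, comment) tuples
--
--     Returns:
--         Formatted markdown table string
--     """
--     if not entries:
--         return f"""# {title}
--
-- | Date       | Entry                                  | Comment   |
-- |------------|----------------------------------------|-----------|
-- """
--
--     table_lines = [f"# {title}", "", "| Date       | Entry                                  | Comment   |", "|------------|----------------------------------------|-----------|"]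
--
--     prev_date = None
--     for date, entry, comment in entries:
--         date_display = date if date != prev_date else ""
--         comment_display = comment if comment else ""
--         table_lines.append(f"| {date_display:10} | {entry:38} | {comment_display:9} |")
--         prev_date = date
--
--     return "\n".join(table_lines) + "\n"
-- ===== SOURCE B (Python) =====
-- def _fmt(date, entry, comment):
--     return f"| {date:10} | {entry:38} | {(comment or ''):9} |"
--
--
-- def _group_runs(entries):
--     """Split entries into maximal runs of consecutive equal dates:
--     returns a list of (date, (first_entry, first_comment), rest_pairs)."""
--     if not entries:
--         return []
--     date, entry, comment = entries[0]
--     i = 1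
--     while i < len(entries) and entries[i][0] == date:
--         i += 1
--     rest = [(e, c) for _, e, c in entries[1:i]]
--     return [(date, (entry, comment), rest)] + _group_runs(entries[i:])
--
--
-- def get_aggregated_table_template(title: str, entries: list) -> str:
--     """Staged decomposition: first group consecutive rows by equal date into
--     runs, then render each run (date on its first row, blank on the rest);
--     the empty-entries special case disappears (the header join equals it)."""
--     lines = [
--         f"# {title}",
--         "",
--         "| Date       | Entry                                  | Comment   |",
--         "|------------|----------------------------------------|-----------|",
--     ]
--     for date, (entry, comment), rest in _group_runs(entries):
--         lines.append(_fmt(date, entry, comment))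
--         lines += [_fmt("", e, c) for e, c in rest]
--     return "\n".join(lines) + "\n"
-- ===== Notes on version B (the rewrite author's own statement) =====
-- stated objective: alternative
-- what changed: Replaces the prev_date-tracking flat loop with a staged pipeline: a recursive pass first splits entries into maximal runs of consecutive equal dates, then a rendering pass emits each run (date on its first row, blank on the rest); the empty-entries special case is dropped since the header join equals it.
import Mathlib
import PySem

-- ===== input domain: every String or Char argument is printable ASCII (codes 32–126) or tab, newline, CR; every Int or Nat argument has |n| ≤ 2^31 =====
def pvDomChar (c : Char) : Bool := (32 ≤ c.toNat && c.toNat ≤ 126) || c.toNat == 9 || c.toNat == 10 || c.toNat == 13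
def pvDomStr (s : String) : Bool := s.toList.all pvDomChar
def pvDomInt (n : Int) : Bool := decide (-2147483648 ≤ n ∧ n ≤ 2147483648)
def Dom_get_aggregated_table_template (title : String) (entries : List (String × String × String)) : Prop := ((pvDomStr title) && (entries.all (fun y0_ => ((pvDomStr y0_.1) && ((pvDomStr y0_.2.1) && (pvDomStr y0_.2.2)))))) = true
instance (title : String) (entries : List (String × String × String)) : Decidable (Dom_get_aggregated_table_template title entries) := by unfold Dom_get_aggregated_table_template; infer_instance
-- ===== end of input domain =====

-- ===== PORT A =====
-- B changes the decomposition: a grouping pass into runs of consecutive equal dates, then a rendering pass; same output, same cost.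
-- shared row formatting: the f-string '| {x:10} | {y:38} | {z:9} |' (left-justified space padding), identical in both Pythons
def pvPad (s : String) (w : Nat) : String :=
  String.ofList (s.toList ++ List.replicate (w - s.toList.length) ' ')

def pvRow (dateDisplay entry commentDisplay : String) : String :=
  "| " ++ pvPad dateDisplay 10 ++ " | " ++ pvPad entry 38 ++ " | " ++ pvPad commentDisplay 9 ++ " |"

def pvHdr1 : String := "| Date       | Entry                                  | Comment   |"
def pvHdr2 : String := "|------------|----------------------------------------|-----------|"

def get_aggregated_table_template (title : String) (entries : List (String × String × String)) : String :=
  if entries = [] then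
    "# " ++ title ++ "\n\n" ++ pvHdr1 ++ "\n" ++ pvHdr2 ++ "\n"
  else
    let table_lines : List String := ["# " ++ title, "", pvHdr1, pvHdr2]
    -- prev_date starts as Python's None, modelled by (none : Option String)
    let res := entries.foldl
      (fun (st : List String × Option String) row =>
        let date_display := if some row.1 ≠ st.2 then row.1 else ""
        let comment_display := if row.2.2 ≠ "" then row.2.2 else ""
        (st.1 ++ [pvRow date_display row.2.1 comment_display], some row.1))
      (table_lines, none)
    PySem.Str.join "\n" res.1 ++ "\n"

-- ===== PORT B =====
-- _group_runs: the index scan 'entries[1:i] / entries[i:]' is the takeWhile/dropWhile split of the tail (exact: the run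
-- is the maximal prefix of the tail whose date equals the head's date, the recursion continues on the rest)
def pvGroupRuns : List (String × String × String) → List (String × (String × String) × List (String × String))
  | [] => []
  | (d, e, c) :: tl =>
      let run := tl.takeWhile (fun r => r.1 == d)
      (d, (e, c), run.map (fun r => (r.2.1, r.2.2))) :: pvGroupRuns (tl.dropWhile (fun r => r.1 == d))
termination_by l => l.length
decreasing_by
  exact Nat.lt_succ_of_le (List.length_dropWhile_le _ _)

def get_aggregated_table_template_alt (title : String) (entries : List (String × String × String)) : String :=
  let lines : List String := ["# " ++ title, "", pvHdr1, pvHdr2]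
  let rows := (pvGroupRuns entries).flatMap
    (fun g => pvRow g.1 g.2.1.1 (if g.2.1.2 ≠ "" then g.2.1.2 else "")
              :: g.2.2.map (fun r => pvRow "" r.1 (if r.2 ≠ "" then r.2 else "")))
  PySem.Str.join "\n" (lines ++ rows) ++ "\n"

-- ===== PRECONDITION & SPEC =====
def Spec_get_aggregated_table_template (title : String) (entries : List (String × String × String)) (out : String) : Prop := out = get_aggregated_table_template_alt title entries
instance (title : String) (entries : List (String × String × String)) (out : String) : Decidable (Spec_get_aggregated_table_template title entries out) := by unfold Spec_get_aggregated_table_template; infer_instance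

-- ===== CLAIM (what is proved, stated in full; the proofs are below) =====
def Claim_equal_get_aggregated_table_template : Prop := ∀ (title : String) (entries : List (String × String × String)), Dom_get_aggregated_table_template title entries → Spec_get_aggregated_table_template title entries (get_aggregated_table_template title entries)

-- ===== LEMMAS AND PROOFS =====

-- the rows A's fold emits, as a recursive function of the running prev date
def pvRowsA (prev : Option String) : List (String × String × String) → List String
  | [] => []
  | (d, e, c) :: tl =>
      pvRow (if some d ≠ prev then d else "") e (if c ≠ "" then c else "") :: pvRowsA (some d) tl

-- A's fold, from any accumulator and prev date, appends exactly pvRowsA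
theorem pvFold_eq (entries : List (String × String × String))
    (acc : List String) (prev : Option String) :
    (entries.foldl
      (fun (st : List String × Option String) row =>
        let date_display := if some row.1 ≠ st.2 then row.1 else ""
        let comment_display := if row.2.2 ≠ "" then row.2.2 else ""
        (st.1 ++ [pvRow date_display row.2.1 comment_display], some row.1))
      (acc, prev)).1
    = acc ++ pvRowsA prev entries := by
  induction entries generalizing acc prev with
  | nil => simp [pvRowsA]
  | cons hd tl ih =>
      obtain ⟨d, e, c⟩ := hd
      simp only [List.foldl_cons]
      rw [ih]
      simp [pvRowsA, List.append_assoc]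

-- within a run of date d (prev = some d), every row is blank-dated
theorem pvRowsA_run (run rest : List (String × String × String)) (d : String)
    (h : ∀ r ∈ run, r.1 = d) :
    pvRowsA (some d) (run ++ rest)
    = run.map (fun r => pvRow "" r.2.1 (if r.2.2 ≠ "" then r.2.2 else "")) ++ pvRowsA (some d) rest := by
  induction run with
  | nil => simp
  | cons hd tl ih =>
      obtain ⟨d', e, c⟩ := hd
      have hd' : d' = d := h (d', e, c) (by simp)
      subst hd'
      simp only [List.cons_append, pvRowsA, List.map_cons]
      rw [ih (fun r hr => h r (by simp [hr]))]
      simp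

-- pvRowsA from a prev that differs from the head's date equals B's grouped rendering
theorem pvRowsA_eq_groups (l : List (String × String × String)) :
    ∀ prev : Option String,
      (l = [] ∨ ∀ d e c tl, l = (d, e, c) :: tl → prev ≠ some d) →
      pvRowsA prev l
      = (pvGroupRuns l).flatMap
          (fun g => pvRow g.1 g.2.1.1 (if g.2.1.2 ≠ "" then g.2.1.2 else "")
                    :: g.2.2.map (fun r => pvRow "" r.1 (if r.2 ≠ "" then r.2 else ""))) := by
  induction l using pvGroupRuns.induct with
  | case1 => intro prev _; simp [pvRowsA, pvGroupRuns]
  | case2 d e c tl ih =>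
      intro prev hprev
      have hne : prev ≠ some d := by
        rcases hprev with h | h
        · exact absurd h (by simp)
        · exact h d e c tl rfl
      rw [pvGroupRuns]
      simp only [pvRowsA, List.flatMap_cons]
      rw [if_pos (fun h => hne h.symm)]
      have hsplit : tl = tl.takeWhile (fun r => r.1 == d) ++ tl.dropWhile (fun r => r.1 == d) :=
        (List.takeWhile_append_dropWhile).symm
      conv_lhs => rw [hsplit]
      rw [pvRowsA_run _ _ d (fun r hr => by
        have := List.mem_takeWhile_imp hr
        simpa using this)]
      have hrest := ih
      rw [hrest (some d) ?_]
      · simp [List.map_map, Function.comp]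
      · -- head of dropWhile (if any) has a different date
        cases hdrop : tl.dropWhile (fun r => r.1 == d) with
        | nil => exact Or.inl rfl
        | cons hd' tl' =>
            refine Or.inr ?_
            rintro d' e' c' tl'' heq hps
            have h0 : 0 < ((tl.dropWhile (fun r => r.1 == d)).length) := by simp [hdrop]
            have hfail := List.dropWhile_get_zero_not (fun (r : String × String × String) => r.1 == d) tl h0
            rw [heq] at hdrop
            simp only [List.get_eq_getElem, hdrop] at hfail
            simp at hfail
            exact hfail (Option.some.inj hps).symm

-- the empty-entries literal is the joined header
theorem pvJoin_header (title : String) :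
    PySem.Str.join "\n" ["# " ++ title, "", pvHdr1, pvHdr2] ++ "\n"
    = "# " ++ title ++ "\n\n" ++ pvHdr1 ++ "\n" ++ pvHdr2 ++ "\n" := by
  simp [PySem.Str.join, PySem.Chars.join, List.intercalate, ← String.toList_inj, pvHdr1, pvHdr2]

-- ===== VERDICT (by name: the statement is the Claim_ definition above) =====
theorem get_aggregated_table_template_spec : Claim_equal_get_aggregated_table_template := by
  intro title entries _
  unfold Spec_get_aggregated_table_template get_aggregated_table_template get_aggregated_table_template_alt
  by_cases h : entries = []
  · subst h
    simp [pvGroupRuns, pvJoin_header]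
  · simp only [if_neg h]
    rw [pvFold_eq, pvRowsA_eq_groups entries none (by
      cases entries with
      | nil => exact Or.inl rfl
      | cons hd tl => exact Or.inr (fun d e c tl' _ => by simp))]
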